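-- pv_equiv track=rewrite | github.com/BlueSpikeKol/Spiky_Mind | architect_module/function_creation/Research/testResult.py | highlight_word_positions
-- ===== SOURCE A (Python) =====
-- def highlight_word_positions(letter_list, word_size, positions_directions):
--     """
--     This function takes a list of letters, the size of a word, and a nested list of positions
--     and directions. It returns a list of booleans where each boolean corresponds to a position
--     in the letter list. The function sets the boolean value to True for the positions where
--     the letters of the word are located based on the provided positions and directions.
--
--     Parameters:
--     letter_list (list of str): A one-dimensional list of single-character strings.
--     word_size (int): The size of the word to highlight in the list.
--     positions_directions (list of tuples): A nested list of tuples, where each tuple contains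
--         a position (int) and a direction (1 or -1) indicating the sense in which the word was written.
--
--     Returns:
--     list of bool: A list of boolean values where True indicates the presence of a word letter.
--     """
--
--     # Initialize the list of booleans with False
--     bool_list = [False] * len(letter_list)
--
--     # Iterate over each position and direction pair
--     for position, direction in positions_directions:
--         # Calculate the indices of the word's letters based on the current position and direction
--         indices = [position + i * direction for i in range(word_size)]
--
--         # Set the corresponding boolean values to True
--         for idx in indices:
--             if 0 <= idx < len(letter_list):  # Ensure index is within the bounds of the list
--                 bool_list[idx] = True
--
--     return bool_list
-- ===== SOURCE B (Python) =====
-- def _hits(j, p, d, word_size):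
--     # does index j lie on the arithmetic progression p, p+d, ..., p+(word_size-1)*d ?
--     if d == 0:
--         return j == p and word_size > 0
--     q = (j - p) // d
--     return q * d == j - p and 0 <= q < word_size
--
-- def highlight_word_positions(letter_list, word_size, positions_directions):
--     return [any(_hits(j, p, d, word_size) for p, d in positions_directions)
--             for j in range(len(letter_list))]
-- ===== Notes on version B (the rewrite author's own statement) =====
-- stated objective: alternative
-- what changed: Instead of looping word_size times per (position,direction) pair and setting cells of a mutable boolean list, B computes each output cell directly with an O(1) divisibility/range test on the arithmetic progression, so the per-pair word_size loop disappears.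
import Mathlib
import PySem

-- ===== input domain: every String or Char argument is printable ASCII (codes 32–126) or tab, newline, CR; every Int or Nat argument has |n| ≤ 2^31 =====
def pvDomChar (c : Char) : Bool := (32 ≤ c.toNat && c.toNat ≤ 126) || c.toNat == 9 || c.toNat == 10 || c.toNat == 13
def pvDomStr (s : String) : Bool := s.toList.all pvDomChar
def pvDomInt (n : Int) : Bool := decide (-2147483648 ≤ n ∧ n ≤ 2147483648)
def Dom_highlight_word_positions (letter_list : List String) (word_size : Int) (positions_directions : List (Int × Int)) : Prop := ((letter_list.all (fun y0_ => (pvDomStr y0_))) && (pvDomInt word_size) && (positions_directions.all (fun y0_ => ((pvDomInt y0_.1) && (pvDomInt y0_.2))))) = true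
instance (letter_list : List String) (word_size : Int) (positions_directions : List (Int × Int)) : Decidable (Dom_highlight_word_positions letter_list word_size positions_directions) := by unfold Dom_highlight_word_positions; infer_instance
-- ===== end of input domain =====

-- B replaces A's per-pair word_size marking loop by a direct O(1) divisibility/range
-- test for each output cell (alternative algorithm, same exact results).


-- ===== PORT A =====
-- inner loop: for idx in indices: if 0 <= idx < len(letter_list): bool_list[idx] = True
def hwpMark (n : Nat) (bl : List Bool) (indices : List Int) : List Bool :=
  indices.foldl (fun bl idx =>
    if 0 ≤ idx ∧ idx < (n : Int) then bl.set idx.toNat true else bl) bl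

def highlight_word_positions (letter_list : List String) (word_size : Int) (positions_directions : List (Int × Int)) : List Bool :=
  positions_directions.foldl (fun bl pd =>
      hwpMark letter_list.length bl
        ((PySem.List.pyRange 0 word_size 1).map (fun i => pd.1 + i * pd.2)))
    (List.replicate letter_list.length false)

-- ===== PORT B =====
-- _hits(j, p, d, word_size): is j on the progression p, p+d, ..., p+(word_size-1)*d ?
def hwpHits (j p d word_size : Int) : Bool :=
  if d = 0 then decide (j = p ∧ 0 < word_size)
  else
    let q := PySem.Int.floordiv (j - p) d
    decide (q * d = j - p ∧ 0 ≤ q ∧ q < word_size)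

def highlight_word_positions_alt (letter_list : List String) (word_size : Int) (positions_directions : List (Int × Int)) : List Bool :=
  (List.range letter_list.length).map
    (fun j : Nat => positions_directions.any (fun pd => hwpHits (j : Int) pd.1 pd.2 word_size))

-- ===== PRECONDITION & SPEC =====
def Spec_highlight_word_positions (letter_list : List String) (word_size : Int) (positions_directions : List (Int × Int)) (out : List Bool) : Prop := out = highlight_word_positions_alt letter_list word_size positions_directions
instance (letter_list : List String) (word_size : Int) (positions_directions : List (Int × Int)) (out : List Bool) : Decidable (Spec_highlight_word_positions letter_list word_size positions_directions out) := by unfold Spec_highlight_word_positions; infer_instance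

-- ===== CLAIM (what is proved, stated in full; the proofs are below) =====
def Claim_equal_highlight_word_positions : Prop := ∀ (letter_list : List String) (word_size : Int) (positions_directions : List (Int × Int)), Dom_highlight_word_positions letter_list word_size positions_directions → Spec_highlight_word_positions letter_list word_size positions_directions (highlight_word_positions letter_list word_size positions_directions)

-- ===== LEMMAS AND PROOFS =====

-- hwpHits j p d w decides membership of j in the progression {p + i*d | 0 ≤ i < w}
theorem hwpHits_iff (j p d w : Int) :
    hwpHits j p d w = true ↔ ∃ i : Int, 0 ≤ i ∧ i < w ∧ p + i * d = j := by
  unfold hwpHits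
  split_ifs with hd
  · subst hd
    simp only [decide_eq_true_eq]
    constructor
    · rintro ⟨hj, hw⟩; exact ⟨0, le_refl 0, hw, by omega⟩
    · rintro ⟨i, _, hi, he⟩; constructor <;> omega
  · simp only [decide_eq_true_eq]
    constructor
    · rintro ⟨hq, hq0, hqw⟩
      exact ⟨PySem.Int.floordiv (j - p) d, hq0, hqw, by omega⟩
    · rintro ⟨i, h0, hw, he⟩
      have hi : j - p = i * d := by omega
      have : PySem.Int.floordiv (j - p) d = i := by
        rw [hi]; simp [PySem.Int.floordiv, Int.mul_fdiv_cancel _ hd]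
      rw [this]; exact ⟨by omega, h0, hw⟩

-- the inner marking loop keeps the length of the boolean list
theorem hwpMark_length (n : Nat) (bl : List Bool) (indices : List Int) :
    (hwpMark n bl indices).length = bl.length := by
  induction indices generalizing bl with
  | nil => rfl
  | cons idx rest ih =>
    unfold hwpMark at ih ⊢
    simp only [List.foldl_cons]
    rw [ih]
    split_ifs <;> simp

-- cell j after the inner marking loop: old value OR "some idx equals j"
theorem hwpMark_getD (n : Nat) (indices : List Int) (bl : List Bool)
    (hlen : bl.length = n) (j : Nat) (hj : j < n) :
    (hwpMark n bl indices).getD j false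
      = (bl.getD j false || indices.any (fun idx => decide (idx = (j : Int)))) := by
  induction indices generalizing bl with
  | nil => simp [hwpMark]
  | cons idx rest ih =>
    have hstep : hwpMark n bl (idx :: rest)
        = hwpMark n (if 0 ≤ idx ∧ idx < (n : Int) then bl.set idx.toNat true else bl) rest := by
      simp [hwpMark]
    rw [hstep]
    by_cases hg : 0 ≤ idx ∧ idx < (n : Int)
    · rw [if_pos hg, ih _ (by simp [hlen])]
      by_cases he : idx = (j : Int)
      · have hjt : idx.toNat = j := by omega
        have hset : (bl.set idx.toNat true).getD j false = true := by
          rw [List.getD_eq_getElem?_getD, List.getElem?_set]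
          simp [hjt, hlen, hj]
        rw [hset]
        simp [he]
      · have hjt : idx.toNat ≠ j := by omega
        have hset : (bl.set idx.toNat true).getD j false = bl.getD j false := by
          rw [List.getD_eq_getElem?_getD, List.getElem?_set, if_neg hjt,
            ← List.getD_eq_getElem?_getD]
        rw [hset]
        simp [he]
    · rw [if_neg hg, ih _ hlen]
      have he : idx ≠ (j : Int) := by omega
      simp [he]

-- bridge: "j occurs among the marked indices of a pair" is exactly hwpHits
theorem hwpAny_eq_hits (w p d : Int) (j : Nat) :
    ((PySem.List.pyRange 0 w 1).map (fun i => p + i * d)).any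
        (fun idx => decide (idx = (j : Int))) = hwpHits (j : Int) p d w := by
  rw [Bool.eq_iff_iff, hwpHits_iff]
  simp only [List.any_eq_true, List.mem_map, decide_eq_true_eq]
  constructor
  · rintro ⟨idx, ⟨i, hi, rfl⟩, he⟩
    rw [PySem.List.mem_pyRange_one] at hi
    exact ⟨i, hi.1, hi.2, he⟩
  · rintro ⟨i, h0, hw, he⟩
    exact ⟨p + i * d, ⟨i, PySem.List.mem_pyRange_one.mpr ⟨h0, hw⟩, rfl⟩, he⟩

-- outer fold: length preserved
theorem hwpA_length (n : Nat) (w : Int) (pds : List (Int × Int)) (bl : List Bool) :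
    (pds.foldl (fun bl pd =>
        hwpMark n bl ((PySem.List.pyRange 0 w 1).map (fun i => pd.1 + i * pd.2))) bl).length
      = bl.length := by
  induction pds generalizing bl with
  | nil => rfl
  | cons pd rest ih => simp only [List.foldl_cons]; rw [ih, hwpMark_length]

-- outer fold: cell j is old value OR "some pair hits j"
theorem hwpA_getD (n : Nat) (w : Int) (pds : List (Int × Int)) (bl : List Bool)
    (hlen : bl.length = n) (j : Nat) (hj : j < n) :
    (pds.foldl (fun bl pd =>
        hwpMark n bl ((PySem.List.pyRange 0 w 1).map (fun i => pd.1 + i * pd.2))) bl).getD j false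
      = (bl.getD j false || pds.any (fun pd => hwpHits (j : Int) pd.1 pd.2 w)) := by
  induction pds generalizing bl with
  | nil => simp
  | cons pd rest ih =>
    simp only [List.foldl_cons, List.any_cons]
    rw [ih _ (by rw [hwpMark_length, hlen]),
      hwpMark_getD n _ bl hlen j hj, hwpAny_eq_hits, Bool.or_assoc]

-- ===== VERDICT (by name: the statement is the Claim_ definition above) =====
theorem highlight_word_positions_spec : Claim_equal_highlight_word_positions := by
  intro letter_list word_size pds _
  unfold Spec_highlight_word_positions highlight_word_positions highlight_word_positions_alt
  set n := letter_list.length with hn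
  apply List.ext_getElem?
  intro j
  have hAlen : (pds.foldl (fun bl pd =>
      hwpMark n bl ((PySem.List.pyRange 0 word_size 1).map (fun i => pd.1 + i * pd.2)))
      (List.replicate n false)).length = n := by
    rw [hwpA_length]; simp
  by_cases hj : j < n
  · have hA : (pds.foldl (fun bl pd =>
        hwpMark n bl ((PySem.List.pyRange 0 word_size 1).map (fun i => pd.1 + i * pd.2)))
        (List.replicate n false))[j]?
        = some (pds.any (fun pd => hwpHits (j : Int) pd.1 pd.2 word_size)) := by
      rw [List.getElem?_eq_getElem (by omega)]
      congr 1
      have := hwpA_getD n word_size pds (List.replicate n false) (by simp) j hj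
      rw [List.getD_eq_getElem?_getD, List.getElem?_eq_getElem (by omega)] at this
      simpa using this
    rw [hA, List.getElem?_map, List.getElem?_range hj]
    rfl
  · rw [List.getElem?_eq_none (by omega), List.getElem?_eq_none (by simp; omega)]
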